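-- pv_equiv track=rewrite | github.com/ValentimSts/Instituto-Superior-Tecnico | fp/p1.py | eh_posicao_livre
-- ===== SOURCE A (Python) =====
-- def eh_tabuleiro(tab):
--     """diz se o tabuleiro escolhido e aceite"""
--     aceites = ('1','0','-1')
--     a = 0
--     if isinstance(tab, tuple):  # ve se o tab e um tuplo
--         for linha in tab:
--             if isinstance(linha, tuple):  #ve se a linha e um tuplo
--                 for elemento in linha:
--                     if isinstance(elemento, int):  # ve se o elemento e um int
--                         if str(elemento) in aceites:  # ve se o elemento e aceite
--                             a = a + 1
--                     else:
--                         return False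
--             else:
--                 return False
--         if a == 9:
--             return True
--         else:
--             return False
--     else:
--         return False
--
-- def eh_posicao(n):
--     """verifica se a posicao escolhida pertence ao tabuleiro, 1 a 9 inclusive"""
--     aceites = ('1','2','3','4','5','6','7','8','9')
--     if str(n) in aceites:  # ve se a posicao escolhida e aceite
--         return True
--     else:
--         return False
--
-- def eh_posicao_livre(tab, n):
--     """devolve True se a posicao escolhida for ocupada por um 0, ou seja, uma
--     posicao livre"""
--     if eh_tabuleiro(tab):
--         if isinstance(n, int) and eh_posicao(n): # ve se a posicao (n) e um int e e posicao aceite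
--             tab_c = tab_completo(tab)
--             for i in tab_c:
--                 if tab_c[n-1] == 0:  # ve se a posicao escolhida e uma posicao livre
--                     return True
--                 else:
--                     return False
--         else:
--             raise ValueError ("eh_posicao_livre: algum dos argumentos e invalido")
--     else:
--         raise ValueError ("eh_posicao_livre: algum dos argumentos e invalido")
--
-- def tab_completo(tab):
--     """funcao auxiliar: retorna o tabuleiro completo num so tuplo"""
--     tab_c = ()
--     if eh_tabuleiro(tab):
--         for linha in tab:
--             for elemento in linha:
--                 tab_c = tab_c + (elemento, ) # retorna o tabuleiro num so tuplo
--         return tab_c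
--     else:
--         raise ValueError ("tab_completo: algum dos argumentos e invalido")
-- ===== SOURCE B (Python) =====
-- def eh_posicao_livre(tab, n):
--     """devolve True se a posicao escolhida for ocupada por um 0, ou seja, uma
--     posicao livre"""
--     # validation: the board is accepted iff it counts exactly 9 cells in {-1, 0, 1}
--     count = sum(1 for row in tab for x in row if x in (-1, 0, 1))
--     if count != 9 or not 1 <= n <= 9:
--         raise ValueError("eh_posicao_livre: algum dos argumentos e invalido")
--     # address cell n-1 in place, walking the rows, without building a flat tuple
--     k = n - 1
--     for row in tab:
--         if k < len(row):
--             return row[k] == 0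
--         k -= len(row)
-- ===== Notes on version B (the rewrite author's own statement) =====
-- stated objective: simpler
-- what changed: Replaces A's three helper passes (string-comparison board validation, tuple-flattening tab_completo, and a redundant for-loop around a constant index test) with one arithmetic count over the rows plus a direct walk to cell n-1 subtracting row lengths, never building the flat tuple.
import Mathlib
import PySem

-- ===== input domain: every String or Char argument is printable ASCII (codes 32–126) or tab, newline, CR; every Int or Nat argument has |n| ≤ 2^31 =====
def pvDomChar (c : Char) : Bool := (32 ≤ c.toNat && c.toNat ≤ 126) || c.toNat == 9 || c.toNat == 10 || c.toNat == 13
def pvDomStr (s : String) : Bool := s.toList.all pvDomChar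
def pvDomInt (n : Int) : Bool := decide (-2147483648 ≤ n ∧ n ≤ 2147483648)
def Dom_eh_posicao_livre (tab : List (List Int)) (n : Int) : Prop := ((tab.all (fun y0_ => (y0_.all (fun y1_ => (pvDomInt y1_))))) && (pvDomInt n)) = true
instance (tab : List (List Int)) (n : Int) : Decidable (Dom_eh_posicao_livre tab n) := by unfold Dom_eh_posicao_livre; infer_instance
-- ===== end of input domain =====

-- B replaces A's three helper passes (string-compare validation, tuple flattening, redundant loop)
-- with one arithmetic count plus a direct walk to cell n-1; objective: simpler. Return value only
-- (neither version mutates its arguments).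

-- ===== PORT A =====
-- eh_tabuleiro: the isinstance guards always pass under the List (List Int) typing, so the
-- 'return False' branches they guard are unreachable; what remains is the counting loop.
def eh_tabuleiro_A (tab : List (List Int)) : Bool :=
  (tab.foldl (fun a linha =>
    linha.foldl (fun a elemento =>
      if PySem.Int.toStr elemento = "1" ∨ PySem.Int.toStr elemento = "0" ∨
         PySem.Int.toStr elemento = "-1"
      then a + 1 else a) a) (0 : Int)) == 9

def eh_posicao_A (n : Int) : Bool :=
  ["1", "2", "3", "4", "5", "6", "7", "8", "9"].contains (PySem.Int.toStr n)

-- tab_completo: the else branch raises ValueError in Python; it is unreachable from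
-- eh_posicao_livre's call site (guarded by the same eh_tabuleiro test).
def tab_completo_A (tab : List (List Int)) : List Int :=
  if eh_tabuleiro_A tab then
    tab.foldl (fun tab_c linha => linha.foldl (fun tab_c elemento => tab_c ++ [elemento]) tab_c) []
  else []

def eh_posicao_livre (tab : List (List Int)) (n : Int) : Bool :=
  if eh_tabuleiro_A tab then
    if eh_posicao_A n then
      let tab_c := tab_completo_A tab
      match tab_c with
      | [] => false        -- loop body never runs: Python returns None (no Bool; excluded by Pre_)
      | _ :: _ =>          -- first iteration returns; pyGet? is none only out of range (IndexError, excluded by Pre_)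
        ((PySem.List.pyGet? tab_c (n - 1)).getD 0) == 0
    else false             -- Python raises ValueError here (excluded by Pre_)
  else false               -- Python raises ValueError here (excluded by Pre_)

-- ===== PORT B =====
def count_B (tab : List (List Int)) : Int :=
  tab.foldl (fun c row =>
    row.foldl (fun c x => if x == -1 || x == 0 || x == 1 then c + 1 else c) c) 0

def pick_B : List (List Int) → Int → Bool
  | [], _ => false         -- loop falls off the rows: Python returns None (excluded by Pre_)
  | row :: rest, k =>
    if k < (row.length : Int) then ((PySem.List.pyGet? row k).getD 0) == 0
    else pick_B rest (k - (row.length : Int))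

def eh_posicao_livre_alt (tab : List (List Int)) (n : Int) : Bool :=
  if count_B tab ≠ 9 ∨ ¬ (1 ≤ n ∧ n ≤ 9) then false   -- Python raises ValueError here (excluded by Pre_)
  else pick_B tab (n - 1)

-- ===== PRECONDITION & SPEC =====
-- Pre_: exactly the inputs on which A returns normally: the board counts exactly nine cells
-- in {-1,0,1} (A's acceptance test) and 1 ≤ n ≤ 9; everywhere else A raises ValueError.
def Pre_eh_posicao_livre (tab : List (List Int)) (n : Int) : Prop :=
  (tab.flatten.countP (fun x => x == -1 || x == 0 || x == 1)) = 9 ∧ 1 ≤ n ∧ n ≤ 9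
instance (tab : List (List Int)) (n : Int) : Decidable (Pre_eh_posicao_livre tab n) := by
  unfold Pre_eh_posicao_livre; infer_instance

def pvWitness_eh_posicao_livre : List (List Int) × Int := ([[1, 0, -1], [0, 0, 0], [1, -1, 0]], 5)

def Spec_eh_posicao_livre (tab : List (List Int)) (n : Int) (out : Bool) : Prop :=
  out = eh_posicao_livre_alt tab n
instance (tab : List (List Int)) (n : Int) (out : Bool) : Decidable (Spec_eh_posicao_livre tab n out) := by
  unfold Spec_eh_posicao_livre; infer_instance

-- ===== CLAIM (what is proved, stated in full; the proofs are below) =====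
def Claim_equal_eh_posicao_livre : Prop := ∀ (tab : List (List Int)) (n : Int),
  Dom_eh_posicao_livre tab n → Pre_eh_posicao_livre tab n →
  Spec_eh_posicao_livre tab n (eh_posicao_livre tab n)

-- ===== LEMMAS AND PROOFS =====

-- Characterisation of Nat.toDigitsCore / Nat.toDigits (the engine behind str(n)).
lemma tdc_len (f : Nat) : ∀ (n : Nat) (ds : List Char), 0 < f →
    ds.length + 1 ≤ (Nat.toDigitsCore 10 f n ds).length := by
  induction f with
  | zero => intro _ _ h; omega
  | succ f ih =>
    intro n ds _
    simp only [Nat.toDigitsCore]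
    split
    · simp
    · rcases Nat.eq_zero_or_pos f with hf | hf
      · subst hf; simp [Nat.toDigitsCore]
      · have := ih (n / 10) ((n % 10).digitChar :: ds) hf
        simp at this; omega

lemma digitChar_ne_dash (m : Nat) (h : m < 10) : Nat.digitChar m ≠ '-' := by
  interval_cases m <;> decide

lemma tdc_no_dash (f : Nat) : ∀ (n : Nat) (ds : List Char), '-' ∉ ds →
    '-' ∉ Nat.toDigitsCore 10 f n ds := by
  induction f with
  | zero => intro n ds h; simpa [Nat.toDigitsCore] using h
  | succ f ih =>
    intro n ds h
    simp only [Nat.toDigitsCore]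
    have hd : Nat.digitChar (n % 10) ≠ '-' := digitChar_ne_dash _ (Nat.mod_lt _ (by omega))
    split
    · simp only [List.mem_cons, not_or]
      exact ⟨fun hc => hd hc.symm, h⟩
    · refine ih (n / 10) _ ?_
      simp only [List.mem_cons, not_or]
      exact ⟨fun hc => hd hc.symm, h⟩

lemma toDigits_small (m : Nat) (h : m < 10) : Nat.toDigits 10 m = [Nat.digitChar m] := by
  simp [Nat.toDigits, Nat.toDigitsCore, Nat.div_eq_of_lt h, Nat.mod_eq_of_lt h]

lemma toDigits_big (m : Nat) (h : 10 ≤ m) : 2 ≤ (Nat.toDigits 10 m).length := by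
  have hne : m / 10 ≠ 0 := by omega
  have : Nat.toDigits 10 m = Nat.toDigitsCore 10 m (m / 10) [(m % 10).digitChar] := by
    simp [Nat.toDigits, Nat.toDigitsCore, hne]
  rw [this]
  have := tdc_len m (m / 10) [(m % 10).digitChar] (by omega)
  simpa using this

lemma toChars_eq_digit (e : Int) (d : Nat) (hd : d < 10) :
    PySem.Int.toChars e = [Nat.digitChar d] ↔ e = (d : Int) := by
  constructor
  · intro h
    unfold PySem.Int.toChars at h
    split at h
    · have hh : '-' = Nat.digitChar d := List.head_eq_of_cons_eq h
      exact absurd hh.symm (digitChar_ne_dash d hd)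
    · rename_i he
      rcases Nat.lt_or_ge e.toNat 10 with hm | hm
      · rw [toDigits_small _ hm] at h
        have hchar : Nat.digitChar e.toNat = Nat.digitChar d := List.head_eq_of_cons_eq h
        have : e.toNat = d := by
          interval_cases h1 : e.toNat <;> interval_cases d <;> revert hchar <;> decide
        omega
      · have := toDigits_big _ hm
        rw [h] at this; simp at this
  · rintro rfl
    unfold PySem.Int.toChars
    rw [if_neg (by omega)]
    simpa using toDigits_small d hd

lemma toChars_eq_neg_one (e : Int) : PySem.Int.toChars e = ['-', '1'] ↔ e = -1 := by
  constructor
  · intro h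
    unfold PySem.Int.toChars at h
    split at h
    · rename_i he
      have hdig : Nat.toDigits 10 e.natAbs = ['1'] := List.tail_eq_of_cons_eq h
      rcases Nat.lt_or_ge e.natAbs 10 with hm | hm
      · rw [toDigits_small _ hm] at hdig
        have hch : Nat.digitChar e.natAbs = '1' := List.head_eq_of_cons_eq hdig
        have : e.natAbs = 1 := by interval_cases h1 : e.natAbs <;> revert hch <;> decide
        omega
      · have := toDigits_big _ hm
        rw [hdig] at this; simp at this
    · exact absurd (h ▸ List.mem_cons_self)
        (tdc_no_dash _ _ [] (by simp))
  · rintro rfl; decide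

lemma toStr_eq_iff_toChars (e : Int) (s : String) :
    PySem.Int.toStr e = s ↔ PySem.Int.toChars e = s.toList := by
  rw [← PySem.Int.toList_toStr, String.toList_inj]

lemma A_test_iff (e : Int) :
    (PySem.Int.toStr e = "1" ∨ PySem.Int.toStr e = "0" ∨ PySem.Int.toStr e = "-1") ↔
    (e = -1 ∨ e = 0 ∨ e = 1) := by
  rw [toStr_eq_iff_toChars, toStr_eq_iff_toChars, toStr_eq_iff_toChars]
  have h1 : ("1" : String).toList = [Nat.digitChar 1] := by decide
  have h0 : ("0" : String).toList = [Nat.digitChar 0] := by decide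
  have hm : ("-1" : String).toList = ['-', '1'] := by decide
  rw [h1, h0, hm, toChars_eq_digit e 1 (by omega), toChars_eq_digit e 0 (by omega),
    toChars_eq_neg_one]
  omega

lemma pos_test_iff (n : Int) : eh_posicao_A n = true ↔ (1 ≤ n ∧ n ≤ 9) := by
  unfold eh_posicao_A
  simp only [List.contains_eq_mem, List.mem_cons, List.not_mem_nil, or_false, decide_eq_true_eq]
  have hd : ∀ (d : Nat) (s : String), d < 10 → s.toList = [Nat.digitChar d] →
      (PySem.Int.toStr n = s ↔ n = (d : Int)) := by
    intro d s hdlt hs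
    rw [toStr_eq_iff_toChars, hs, toChars_eq_digit n d hdlt]
  rw [hd 1 "1" (by omega) (by decide), hd 2 "2" (by omega) (by decide),
    hd 3 "3" (by omega) (by decide), hd 4 "4" (by omega) (by decide),
    hd 5 "5" (by omega) (by decide), hd 6 "6" (by omega) (by decide),
    hd 7 "7" (by omega) (by decide), hd 8 "8" (by omega) (by decide),
    hd 9 "9" (by omega) (by decide)]
  omega

-- A's counting fold equals B's counting fold.
lemma countA_eq_countB (tab : List (List Int)) :
    (tab.foldl (fun a linha =>
      linha.foldl (fun a elemento =>
        if PySem.Int.toStr elemento = "1" ∨ PySem.Int.toStr elemento = "0" ∨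
           PySem.Int.toStr elemento = "-1"
        then a + 1 else a) a) (0 : Int)) = count_B tab := by
  unfold count_B
  have hfun : (fun (a : Int) (elemento : Int) =>
      if PySem.Int.toStr elemento = "1" ∨ PySem.Int.toStr elemento = "0" ∨
         PySem.Int.toStr elemento = "-1" then a + 1 else a) =
      (fun (c : Int) (x : Int) => if x == -1 || x == 0 || x == 1 then c + 1 else c) := by
    funext a e
    have hb : ((e == -1 || e == 0 || e == 1) = true) ↔ (e = -1 ∨ e = 0 ∨ e = 1) := by
      simp [or_assoc]
    by_cases h : e = -1 ∨ e = 0 ∨ e = 1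
    · rw [if_pos ((A_test_iff e).mpr h), if_pos (hb.mpr h)]
    · rw [if_neg (fun hc => h ((A_test_iff e).mp hc)), if_neg (fun hc => h (hb.mp hc))]
  rw [hfun]

-- B's counting fold counts the flattened board.
lemma countB_eq_countP (tab : List (List Int)) (c : Int) :
    (tab.foldl (fun c row =>
      row.foldl (fun c x => if x == -1 || x == 0 || x == 1 then c + 1 else c) c) c) =
    c + (tab.flatten.countP (fun x => x == -1 || x == 0 || x == 1) : Int) := by
  induction tab generalizing c with
  | nil => simp
  | cons row rest ih =>
    simp only [List.foldl_cons, List.flatten_cons, List.countP_append]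
    rw [PySem.List.foldl_if_add_one, ih]
    push_cast; ring

-- tab_completo's fold is flattening.
lemma tab_completo_flatten (tab : List (List Int)) :
    (tab.foldl (fun tab_c linha =>
      linha.foldl (fun tab_c elemento => tab_c ++ [elemento]) tab_c) ([] : List Int)) =
    tab.flatten := by
  simp only [PySem.List.foldl_append_singleton_eq_self]
  simpa using PySem.List.foldl_append_eq_flatten tab []

-- pyGet? at a nonnegative in-range index is getElem?.
lemma pyGet?_nonneg {α : Type} (xs : List α) (k : Int) (h0 : 0 ≤ k) (hlt : k < xs.length) :
    PySem.List.pyGet? xs k = xs[k.toNat]? := by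
  simp [PySem.List.pyGet?, PySem.List.pyIdx?, h0, hlt]

-- B's row walk reads the flattened board at index k.
lemma pick_eq (tab : List (List Int)) : ∀ (k : Int), 0 ≤ k → k < tab.flatten.length →
    pick_B tab k = (((PySem.List.pyGet? tab.flatten k).getD 0) == 0) := by
  induction tab with
  | nil => intro k h0 hlt; simp at hlt; omega
  | cons row rest ih =>
    intro k h0 hlt
    rw [List.flatten_cons] at hlt ⊢
    simp only [List.length_append] at hlt
    push_cast at hlt
    unfold pick_B
    by_cases hk : k < (row.length : Int)
    · rw [if_pos hk,
        pyGet?_nonneg row k h0 hk,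
        pyGet?_nonneg (row ++ rest.flatten) k h0 (by simp only [List.length_append]; push_cast; omega),
        List.getElem?_append_left (by omega)]
    · have hk2 : (row.length : Int) ≤ k := not_lt.mp hk
      rw [if_neg hk,
        ih (k - row.length) (by omega) (by omega),
        pyGet?_nonneg rest.flatten (k - row.length) (by omega) (by omega),
        pyGet?_nonneg (row ++ rest.flatten) k h0 (by simp only [List.length_append]; push_cast; omega),
        List.getElem?_append_right (by omega)]
      rw [show (k - (row.length : Int)).toNat = k.toNat - row.length by omega]

-- ===== VERDICT (by name: the statement is the Claim_ definition above) =====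
theorem eh_posicao_livre_spec : Claim_equal_eh_posicao_livre := by
  intro tab n _ hpre
  obtain ⟨hcount, hn1, hn9⟩ := hpre
  unfold Spec_eh_posicao_livre
  have hcb : count_B tab = 9 := by
    unfold count_B; rw [countB_eq_countP, hcount]; ring
  have htab : eh_tabuleiro_A tab = true := by
    unfold eh_tabuleiro_A
    rw [countA_eq_countB, hcb]; decide
  have hlen : 9 ≤ tab.flatten.length := by
    have := List.countP_le_length (l := tab.flatten)
      (p := fun x => x == -1 || x == 0 || x == 1)
    omega
  have hcomp : tab_completo_A tab = tab.flatten := by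
    unfold tab_completo_A; rw [if_pos htab, tab_completo_flatten]
  unfold eh_posicao_livre eh_posicao_livre_alt
  rw [if_pos htab, if_pos ((pos_test_iff n).mpr ⟨hn1, hn9⟩),
    if_neg (show ¬ (count_B tab ≠ 9 ∨ ¬ (1 ≤ n ∧ n ≤ 9)) by simp [hcb]; exact ⟨hn1, hn9⟩)]
  rw [pick_eq tab (n - 1) (by omega) (by omega)]
  simp only [hcomp]
  cases hflat : tab.flatten with
  | nil => rw [hflat] at hlen; simp at hlen
  | cons x xs => rfl
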